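-- pv_equiv track=rewrite | github.com/mitchpaulus/dotfiles | python/idf.py | tsv2dict
-- ===== SOURCE A (Python) =====
-- def tsv2dict(file: list[list[str]]) -> dict[str, list[list[str]]]:
--     """Returns grouping by Object Type. Object Type keys are all lowercase. The list of fields includes the object type as the first field."""
--     results = {}
--
--     for line in file:
--         key = line[0].lower()
--         if key in results:
--             results[key].append(line)
--         else:
--             results[key] = [line]
--
--     return results
-- ===== SOURCE B (Python) =====
-- def tsv2dict(file: list[list[str]]) -> dict[str, list[list[str]]]:
--     """Returns grouping by Object Type. Object Type keys are all lowercase. The list of fields includes the object type as the first field."""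
--     keys = list(dict.fromkeys(line[0].lower() for line in file))
--     return {k: [line for line in file if line[0].lower() == k] for k in keys}
-- ===== Notes on version B (the rewrite author's own statement) =====
-- stated objective: alternative
-- what changed: Replaces A's single-pass dict accumulation (append-or-insert per line) with a two-phase pass: dedup the lowercased keys in first-occurrence order, then build each group by filtering the whole file per key.
import Mathlib
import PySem

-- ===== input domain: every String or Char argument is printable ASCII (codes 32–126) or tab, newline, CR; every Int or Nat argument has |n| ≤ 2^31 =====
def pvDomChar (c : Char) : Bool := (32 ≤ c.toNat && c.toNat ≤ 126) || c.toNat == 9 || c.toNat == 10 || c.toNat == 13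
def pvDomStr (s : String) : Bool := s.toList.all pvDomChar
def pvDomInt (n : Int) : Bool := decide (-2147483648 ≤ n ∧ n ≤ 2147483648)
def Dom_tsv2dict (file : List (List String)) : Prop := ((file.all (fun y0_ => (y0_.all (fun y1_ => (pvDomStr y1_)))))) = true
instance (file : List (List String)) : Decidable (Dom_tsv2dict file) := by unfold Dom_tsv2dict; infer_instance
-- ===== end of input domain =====

-- B replaces A's single-pass dict accumulation with dedup-the-keys + per-key filter (alternative decomposition, not faster).

-- shared helper: line[0].lower(); pyGet? is none exactly where Python raises IndexError
-- (those inputs are excluded by Pre_tsv2dict, so the .getD "" default is never reached on admitted inputs)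
def pvKey (line : List String) : String := PySem.Str.lower ((PySem.List.pyGet? line 0).getD "")

-- ===== PORT A =====
def tsv2dictStep (results : PySem.Dict String (List (List String))) (line : List String) :
    PySem.Dict String (List (List String)) :=
  let key := pvKey line
  if results.contains key then results.modify key [] (fun v => v ++ [line])
  else results.insert key [line]

def tsv2dict (file : List (List String)) : List (String × List (List String)) :=
  (file.foldl tsv2dictStep PySem.Dict.empty).items

-- ===== PORT B =====
def tsv2dict_alt (file : List (List String)) : List (String × List (List String)) :=
  let keys := PySem.List.dedup (file.map pvKey)
  keys.map (fun k => (k, file.filter (fun line => pvKey line == k)))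

-- ===== PRECONDITION & SPEC =====
-- Pre_ excludes files containing an empty line, on which Python's line[0] raises IndexError (in A and in B alike).
def Pre_tsv2dict (file : List (List String)) : Prop := ∀ line ∈ file, line ≠ []
instance (file : List (List String)) : Decidable (Pre_tsv2dict file) := by unfold Pre_tsv2dict; infer_instance

def pvWitness_tsv2dict : List (List String) :=
  [["Zone", "a"], ["zone", "b"], ["Wall"], ["ZONE", "c"]]

def Spec_tsv2dict (file : List (List String)) (out : List (String × List (List String))) : Prop := out = tsv2dict_alt file
instance (file : List (List String)) (out : List (String × List (List String))) : Decidable (Spec_tsv2dict file out) := by unfold Spec_tsv2dict; infer_instance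

-- ===== CLAIM (what is proved, stated in full; the proofs are below) =====
def Claim_equal_tsv2dict : Prop := ∀ (file : List (List String)), Dom_tsv2dict file → Pre_tsv2dict file → Spec_tsv2dict file (tsv2dict file)

-- ===== LEMMAS AND PROOFS =====

lemma pv_dedup_append_singleton (l : List String) (a : String) :
    PySem.List.dedup (l ++ [a]) =
      if a ∈ l then PySem.List.dedup l else PySem.List.dedup l ++ [a] := by
  simp only [PySem.List.dedup, PySem.Set.ofList, List.foldl_append, List.foldl_cons,
    List.foldl_nil, PySem.Set.add]
  by_cases h : a ∈ l
  · have hc : (List.foldl PySem.Set.add PySem.Set.empty l).contains a = true := by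
      have : a ∈ PySem.Set.ofList l := (PySem.Set.mem_ofList l a).mpr h
      simpa [PySem.Set.ofList, List.contains_iff_mem] using this
    rw [if_pos hc, if_pos h]
  · have hc : (List.foldl PySem.Set.add PySem.Set.empty l).contains a = false := by
      have : ¬ a ∈ PySem.Set.ofList l := fun hm => h ((PySem.Set.mem_ofList l a).mp hm)
      simpa [PySem.Set.ofList, List.contains_iff_mem] using this
    rw [if_neg (by simp only [hc]; decide), if_neg h]

lemma pv_fold_items (file : List (List String)) :
    (file.foldl tsv2dictStep PySem.Dict.empty).items =
      (PySem.List.dedup (file.map pvKey)).map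
        (fun k => (k, file.filter (fun line => pvKey line == k))) := by
  induction file using List.reverseRecOn with
  | nil => simp [PySem.Dict.empty, PySem.List.dedup, PySem.Set.ofList]
  | append_singleton xs x ih =>
    rw [List.foldl_append, List.foldl_cons, List.foldl_nil]
    set d := xs.foldl tsv2dictStep PySem.Dict.empty with hd
    have hkeys : d.keys = PySem.List.dedup (xs.map pvKey) := by
      rw [PySem.Dict.keys, ih, List.map_map]
      exact ((List.map_congr_left (fun k _ => rfl)).trans (List.map_id _))
    have hnodup : d.keys.Nodup := by
      rw [hkeys]; exact PySem.Set.nodup_ofList (xs.map pvKey)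
    rw [List.map_append, List.map_cons, List.map_nil, pv_dedup_append_singleton]
    by_cases h : pvKey x ∈ xs.map pvKey
    · have hmemdedup : pvKey x ∈ PySem.List.dedup (xs.map pvKey) := by
        simpa [PySem.List.dedup, PySem.Set.mem_ofList] using h
      have hcont : d.contains (pvKey x) = true :=
        (PySem.Dict.contains_iff_mem_keys d (pvKey x)).mpr (hkeys ▸ hmemdedup)
      have hgetD : d.getD (pvKey x) [] = xs.filter (fun l => pvKey l == pvKey x) := by
        apply PySem.Dict.getD_of_mem_items d ?_ hnodup
        rw [ih]
        exact List.mem_map_of_mem hmemdedup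
      have hstep : tsv2dictStep d x
          = d.insert (pvKey x) (xs.filter (fun l => pvKey l == pvKey x) ++ [x]) := by
        simp [tsv2dictStep, hcont, PySem.Dict.modify, hgetD]
      rw [hstep, PySem.Dict.items_insert_of_contains d _ hcont, ih, if_pos h, List.map_map]
      apply List.map_congr_left
      intro k _
      by_cases hk : k = pvKey x
      · subst hk
        simp [List.filter_append]
      · simp [List.filter_append, hk, Ne.symm hk]
    · have hcont : d.contains (pvKey x) = false := by
        rw [Bool.eq_false_iff]
        intro hc
        exact h (by simpa [PySem.List.dedup, PySem.Set.mem_ofList, hkeys]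
          using (PySem.Dict.contains_iff_mem_keys d (pvKey x)).mp hc)
      have hstep : tsv2dictStep d x = d.insert (pvKey x) [x] := by
        simp [tsv2dictStep, hcont]
      have hfilt : xs.filter (fun l => pvKey l == pvKey x) = [] := by
        apply List.filter_eq_nil_iff.mpr
        intro l hl
        simp only [beq_iff_eq]
        intro he
        exact h (he ▸ List.mem_map_of_mem hl)
      rw [hstep, PySem.Dict.items_insert_of_not_contains d _ hcont, ih, if_neg h,
        List.map_append, List.map_cons, List.map_nil]
      congr 1
      · apply List.map_congr_left
        intro k hkmem
        have hkx : pvKey x ≠ k := by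
          intro he
          exact h (he ▸ by simpa [PySem.List.dedup, PySem.Set.mem_ofList] using hkmem)
        simp [List.filter_append, hkx]
      · simp [List.filter_append, hfilt]

-- ===== VERDICT (by name: the statement is the Claim_ definition above) =====
theorem tsv2dict_spec : Claim_equal_tsv2dict := by
  intro file _ _
  unfold Spec_tsv2dict tsv2dict tsv2dict_alt
  exact pv_fold_items file
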